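-- pv_equiv track=rewrite | github.com/eapolinario/advent-of-code | 2020/day-16/part-2.py | calculate_invalid_values
-- ===== SOURCE A (Python) =====
-- def is_valid(value, field):
--     constraints = field[1]
--     return (constraints[0][0] <= value <= constraints[0][1]) or (constraints[1][0] <= value <= constraints[1][1])
--
-- def calculate_invalid_values(fields, ticket):
--     invalid_values = []
--     for n in ticket:
--         valid = False
--         checks = list(map(lambda f: is_valid(n, f), fields))
--         if not any(checks):
--             invalid_values.append(n)
--     return invalid_values
-- ===== SOURCE B (Python) =====
-- def _bisect_right(a, x):
--     lo, hi = 0, len(a)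
--     while lo < hi:
--         mid = (lo + hi) // 2
--         if x < a[mid]:
--             hi = mid
--         else:
--             lo = mid + 1
--     return lo
--
-- def calculate_invalid_values(fields, ticket):
--     # Build a sorted, merged table of the valid intervals once, then locate
--     # each ticket value in it by binary search instead of rescanning every field.
--     intervals = sorted((r for _, rs in fields for r in rs), key=lambda r: r[0])
--     merged = []
--     cur = None
--     for lo, hi in intervals:
--         if cur is None:
--             cur = (lo, hi)
--         elif lo <= cur[1] + 1:
--             if hi > cur[1]:
--                 cur = (cur[0], hi)
--         else:
--             merged.append(cur)
--             cur = (lo, hi)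
--     if cur is not None:
--         merged.append(cur)
--     starts = [iv[0] for iv in merged]
--     result = []
--     for n in ticket:
--         i = _bisect_right(starts, n) - 1
--         if i < 0 or n > merged[i][1]:
--             result.append(n)
--     return result
-- ===== Notes on version B (the rewrite author's own statement) =====
-- stated objective: faster
-- what changed: Instead of rescanning every field's two ranges for each ticket value, B flattens the fields' ranges once into a sorted, merged interval table and locates each value in it by binary search.
import Mathlib
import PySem

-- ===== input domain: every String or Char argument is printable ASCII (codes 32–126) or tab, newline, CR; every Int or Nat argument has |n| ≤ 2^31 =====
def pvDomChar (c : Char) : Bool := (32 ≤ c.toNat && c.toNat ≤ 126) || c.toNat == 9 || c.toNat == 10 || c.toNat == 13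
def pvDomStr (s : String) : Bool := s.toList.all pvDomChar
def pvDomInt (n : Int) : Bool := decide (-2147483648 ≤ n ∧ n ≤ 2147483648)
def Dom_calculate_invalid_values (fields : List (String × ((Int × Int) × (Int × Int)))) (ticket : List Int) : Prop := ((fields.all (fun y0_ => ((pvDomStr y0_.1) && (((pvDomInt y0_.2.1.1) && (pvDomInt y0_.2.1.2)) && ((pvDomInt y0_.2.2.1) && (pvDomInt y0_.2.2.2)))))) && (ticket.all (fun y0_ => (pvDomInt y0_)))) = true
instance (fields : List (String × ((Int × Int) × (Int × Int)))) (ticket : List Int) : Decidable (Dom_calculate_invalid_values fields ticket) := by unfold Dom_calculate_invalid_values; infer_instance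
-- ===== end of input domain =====

-- B replaces A's per-value rescan of every field by a sorted, merged interval table
-- queried once per value by binary search (alternative data structure; return value identical).

-- ===== PORT A =====
def is_valid (value : Int) (field : String × ((Int × Int) × (Int × Int))) : Bool :=
  let constraints := field.2
  (decide (constraints.1.1 ≤ value) && decide (value ≤ constraints.1.2)) ||
  (decide (constraints.2.1 ≤ value) && decide (value ≤ constraints.2.2))

def calculate_invalid_values (fields : List (String × ((Int × Int) × (Int × Int)))) (ticket : List Int) : List Int :=
  ticket.foldl (fun invalid_values n =>
    let checks := fields.map (fun f => is_valid n f)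
    if !(checks.any id) then invalid_values ++ [n] else invalid_values) []

-- ===== PORT B =====
-- the body of B's merge loop over the sorted intervals (state = (merged, cur))
def mergeLoop (state : List (Int × Int) × Option (Int × Int)) (iv : Int × Int) :
    List (Int × Int) × Option (Int × Int) :=
  match state.2 with
  | none => (state.1, some iv)
  | some cur =>
    if iv.1 ≤ cur.2 + 1 then
      if iv.2 > cur.2 then (state.1, some (cur.1, iv.2)) else (state.1, some cur)
    else (state.1 ++ [cur], some iv)

-- Source B's _bisect_right is the CPython bisect_right loop = PySem.List.bisectRight
def calculate_invalid_values_alt (fields : List (String × ((Int × Int) × (Int × Int)))) (ticket : List Int) : List Int :=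
  let intervals := PySem.List.sorted (fields.flatMap (fun f => [f.2.1, f.2.2])) (fun r => r.1)
  let s := intervals.foldl mergeLoop ([], none)
  let merged := match s.2 with | none => s.1 | some cur => s.1 ++ [cur]
  let starts := merged.map (fun iv => iv.1)
  ticket.foldl (fun result n =>
    let i : Int := (PySem.List.bisectRight starts n : Int) - 1
    if i < 0 || decide (n > (PySem.List.pyGetD merged i (0, 0)).2) then result ++ [n]
    else result) []

-- ===== PRECONDITION & SPEC =====
def Spec_calculate_invalid_values (fields : List (String × ((Int × Int) × (Int × Int)))) (ticket : List Int) (out : List Int) : Prop := out = calculate_invalid_values_alt fields ticket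
instance (fields : List (String × ((Int × Int) × (Int × Int)))) (ticket : List Int) (out : List Int) : Decidable (Spec_calculate_invalid_values fields ticket out) := by unfold Spec_calculate_invalid_values; infer_instance

-- ===== CLAIM (what is proved, stated in full; the proofs are below) =====
def Claim_equal_calculate_invalid_values : Prop := ∀ (fields : List (String × ((Int × Int) × (Int × Int)))) (ticket : List Int), Dom_calculate_invalid_values fields ticket → Spec_calculate_invalid_values fields ticket (calculate_invalid_values fields ticket)

-- ===== LEMMAS AND PROOFS =====

-- n lies in some interval of l
def coveredb (l : List (Int × Int)) (n : Int) : Bool := l.any (fun iv => decide (iv.1 ≤ n ∧ n ≤ iv.2))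

-- invariant relation on the merged table: starts nondecreasing and a real gap between intervals
def ivR (a b : Int × Int) : Prop := a.1 ≤ b.1 ∧ a.2 + 1 < b.1

def mergedOf (s : List (Int × Int) × Option (Int × Int)) : List (Int × Int) :=
  match s.2 with | none => s.1 | some cur => s.1 ++ [cur]

-- one pass of the merge loop preserves the invariant and adds iv's coverage
lemma merge_step (s : List (Int × Int) × Option (Int × Int)) (iv : Int × Int)
    (hnone : s.2 = none → s.1 = [])
    (hR : (mergedOf s).Pairwise ivR)
    (hlei : ∀ a ∈ mergedOf s, a.1 ≤ iv.1) :
    ((mergeLoop s iv).2 ≠ none) ∧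
    (mergedOf (mergeLoop s iv)).Pairwise ivR ∧
    (∀ a ∈ mergedOf (mergeLoop s iv), a.1 = iv.1 ∨ ∃ a' ∈ mergedOf s, a.1 = a'.1) ∧
    ∀ n, coveredb (mergedOf (mergeLoop s iv)) n
        = (coveredb (mergedOf s) n || decide (iv.1 ≤ n ∧ n ≤ iv.2)) := by
  obtain ⟨done, _ | cur⟩ := s
  · have hd : done = [] := hnone rfl
    subst hd
    refine ⟨by simp [mergeLoop], ?_, ?_, ?_⟩ <;> simp [mergeLoop, mergedOf, coveredb]
  · have hcur : cur.1 ≤ iv.1 := hlei cur (by simp [mergedOf])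
    simp only [mergedOf] at hR hlei
    obtain ⟨hd, -, hdc⟩ := List.pairwise_append.mp hR
    by_cases h1 : iv.1 ≤ cur.2 + 1
    · by_cases h2 : iv.2 > cur.2
      · -- extend the current interval to (cur.1, iv.2)
        refine ⟨by simp [mergeLoop, h1, h2], ?_, ?_, ?_⟩
        · simp only [mergeLoop, h1, h2, if_true, mergedOf]
          rw [List.pairwise_append]
          refine ⟨hd, by simp, ?_⟩
          intro a ha b hb
          simp only [List.mem_singleton] at hb
          subst hb
          have h := hdc a ha cur (by simp)
          exact ⟨h.1, h.2⟩
        · intro a ha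
          simp only [mergeLoop, h1, h2, if_true, mergedOf,
            List.mem_append, List.mem_singleton] at ha
          rcases ha with ha | ha
          · exact Or.inr ⟨a, by simp [mergedOf, ha], rfl⟩
          · exact Or.inr ⟨cur, by simp [mergedOf], by rw [ha]⟩
        · intro n
          simp only [mergeLoop, h1, h2, if_true, mergedOf]
          simp only [coveredb, List.any_append, List.any_cons, List.any_nil, Bool.or_false,
            Bool.or_assoc]
          congr 1
          rw [← Bool.decide_or, decide_eq_decide]
          omega
      · -- iv is inside the current interval: state unchanged
        refine ⟨by simp [mergeLoop, h1, h2], ?_, ?_, ?_⟩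
        · simpa [mergeLoop, h1, h2, mergedOf] using hR
        · intro a ha
          simp only [mergeLoop, h1, h2, if_true, if_false, mergedOf] at ha
          exact Or.inr ⟨a, by simpa [mergedOf] using ha, rfl⟩
        · intro n
          simp only [mergeLoop, h1, h2, if_true, if_false, mergedOf]
          simp only [coveredb, List.any_append, List.any_cons, List.any_nil, Bool.or_false,
            Bool.or_assoc]
          congr 1
          rw [← Bool.decide_or, decide_eq_decide]
          omega
    · -- a gap: close cur and start a new current interval iv
      refine ⟨by simp [mergeLoop, h1], ?_, ?_, ?_⟩
      · simp only [mergeLoop, h1, if_false, mergedOf]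
        rw [List.append_assoc, List.pairwise_append]
        refine ⟨hd, ?_, ?_⟩
        · simp only [List.cons_append, List.nil_append, List.pairwise_cons]
          refine ⟨?_, by simp⟩
          intro b hb
          simp only [List.mem_singleton] at hb
          subst hb
          exact ⟨hcur, by omega⟩
        · intro a ha b hb
          simp only [List.cons_append, List.nil_append, List.mem_cons,
            List.not_mem_nil, or_false] at hb
          have h := hdc a ha cur (by simp)
          rcases hb with hb | hb
          · rw [hb]; exact h
          · rw [hb]; exact ⟨le_trans h.1 hcur, lt_of_lt_of_le h.2 hcur⟩
      · intro a ha
        simp only [mergeLoop, h1, if_false, mergedOf,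
          List.append_assoc, List.mem_append, List.mem_cons,
          List.cons_append, List.nil_append, List.not_mem_nil, or_false] at ha
        rcases ha with ha | ha | ha
        · exact Or.inr ⟨a, by simp [mergedOf, ha], rfl⟩
        · exact Or.inr ⟨cur, by simp [mergedOf], by rw [ha]⟩
        · exact Or.inl (by rw [ha])
      · intro n
        simp only [mergeLoop, h1, if_false, mergedOf]
        simp only [coveredb, List.any_append, List.any_cons, List.any_nil, Bool.or_false,
          Bool.or_assoc]

lemma merge_fold (rest : List (Int × Int)) (s : List (Int × Int) × Option (Int × Int))
    (hrest : rest.Pairwise (fun a b => a.1 ≤ b.1))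
    (hnone : s.2 = none → s.1 = [])
    (hR : (mergedOf s).Pairwise ivR)
    (hle : ∀ a ∈ mergedOf s, ∀ iv ∈ rest, a.1 ≤ iv.1) :
    (mergedOf (rest.foldl mergeLoop s)).Pairwise ivR ∧
    ∀ n, coveredb (mergedOf (rest.foldl mergeLoop s)) n = (coveredb (mergedOf s) n || coveredb rest n) := by
  induction rest generalizing s with
  | nil => simp [coveredb, hR]
  | cons iv rest ih =>
    obtain ⟨hiv, hrest'⟩ := List.pairwise_cons.mp hrest
    obtain ⟨hne, hR', hfst, hcov⟩ := merge_step s iv hnone hR (fun a ha => hle a ha iv (by simp))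
    have hle' : ∀ a ∈ mergedOf (mergeLoop s iv), ∀ b ∈ rest, a.1 ≤ b.1 := by
      intro a ha b hb
      rcases hfst a ha with h | ⟨a', ha', h⟩
      · rw [h]; exact hiv b hb
      · rw [h]; exact hle a' ha' b (by simp [hb])
    obtain ⟨H1, H2⟩ := ih (mergeLoop s iv) hrest' (fun h => absurd h hne) hR' hle'
    refine ⟨by simpa using H1, fun n => ?_⟩
    rw [List.foldl_cons, H2 n, hcov n]
    simp [coveredb, List.any_cons, Bool.or_assoc]

lemma covered_mergedAll (ivs : List (Int × Int))
    (hs : ivs.Pairwise (fun a b => a.1 ≤ b.1)) :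
    (mergedOf (ivs.foldl mergeLoop ([], none))).Pairwise ivR ∧
    ∀ n, coveredb (mergedOf (ivs.foldl mergeLoop ([], none))) n = coveredb ivs n := by
  obtain ⟨h1, h2⟩ := merge_fold ivs ([], none) hs (fun _ => rfl) (by simp [mergedOf]) (by simp [mergedOf])
  refine ⟨h1, fun n => ?_⟩
  rw [h2 n]
  simp [mergedOf, coveredb]

-- the bisect test over a table satisfying the invariant decides coverage
lemma bisect_test (merged : List (Int × Int)) (hR : merged.Pairwise ivR) (n : Int) :
    ((((PySem.List.bisectRight (merged.map (fun iv => iv.1)) n : Int) - 1) < 0 ||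
      decide (n > (PySem.List.pyGetD merged ((PySem.List.bisectRight (merged.map (fun iv => iv.1)) n : Int) - 1) (0, 0)).2))
     = !coveredb merged n) := by
  have hmono : (merged.map (fun iv => iv.1)).Pairwise (· ≤ ·) := by
    rw [List.pairwise_map]; exact hR.imp (fun h => h.1)
  obtain ⟨hle, hlt1, hlt2⟩ := PySem.List.bisectRight_spec (merged.map (fun iv => iv.1)) n hmono
  set r := PySem.List.bisectRight (merged.map (fun iv => iv.1)) n with hr
  simp only [List.length_map] at hle hlt1 hlt2
  have hfst : ∀ (j : Nat) (hj : j < merged.length), (merged.map (fun iv => iv.1))[j]'(by simpa) = merged[j].1 := by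
    intro j hj; simp
  have hidx := List.pairwise_iff_getElem.mp hR
  rcases Nat.eq_zero_or_pos r with h0 | hpos
  · -- all starts exceed n: nothing covers n
    have hnc : coveredb merged n = false := by
      rw [coveredb, List.any_eq_false]
      rintro iv hiv
      obtain ⟨j, hj, rfl⟩ := List.mem_iff_getElem.mp hiv
      have := hlt2 j hj (by omega)
      rw [hfst j hj] at this
      simp; omega
    simp [h0, hnc]
  · have hjr : r - 1 < merged.length := by omega
    have hcast : (r : Int) - 1 = ((r - 1 : Nat) : Int) := by omega
    have hget : PySem.List.pyGetD merged ((r : Int) - 1) (0, 0) = merged[r - 1] := by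
      rw [hcast, PySem.List.pyGetD_natCast, List.getD_eq_getElem _ _ hjr]
    have hstart : merged[r - 1].1 ≤ n := by
      have := hlt1 (r - 1) hjr (by omega)
      rwa [hfst (r - 1) hjr] at this
    by_cases hcov : n ≤ merged[r - 1].2
    · -- covered by merged[r-1]
      have hc : coveredb merged n = true := by
        rw [coveredb, List.any_eq_true]
        exact ⟨merged[r - 1], List.getElem_mem hjr, by simp [hstart, hcov]⟩
      have : ¬ ((r : Int) - 1 < 0) := by omega
      simp [hget, hc, this, hcov]
    · -- n is past merged[r-1] and before merged[r]: nothing covers n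
      have hnc : coveredb merged n = false := by
        rw [coveredb, List.any_eq_false]
        rintro iv hiv
        obtain ⟨j, hj, rfl⟩ := List.mem_iff_getElem.mp hiv
        simp only [decide_eq_true_eq, not_and, not_le]
        intro hjn
        rcases lt_trichotomy j (r - 1) with hlt | heq | hgt
        · obtain ⟨-, hgap⟩ := hidx j (r - 1) hj hjr hlt
          omega
        · subst heq; omega
        · have := hlt2 j hj (by omega)
          rw [hfst j hj] at this
          omega
      have : ¬ ((r : Int) - 1 < 0) := by omega
      simp [hget, hnc, this]
      omega

-- A filters the ticket by "no field validates n"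
lemma portA_eq_filter (fields : List (String × ((Int × Int) × (Int × Int)))) (ticket : List Int) :
    calculate_invalid_values fields ticket
      = ticket.filter (fun n => !((fields.map (fun f => is_valid n f)).any id)) := by
  simpa [calculate_invalid_values] using
    PySem.List.foldl_append_if_eq_filter
      (p := fun n => !((fields.map (fun f => is_valid n f)).any id)) (l := ticket) (acc := [])

-- field validity is coverage by the field's two intervals
lemma anyFields_eq_coveredb (fields : List (String × ((Int × Int) × (Int × Int)))) (n : Int) :
    (fields.map (fun f => is_valid n f)).any id
      = coveredb (fields.flatMap (fun f => [f.2.1, f.2.2])) n := by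
  simp [coveredb, is_valid, List.any_flatMap, List.any_map]

lemma coveredb_perm {l₁ l₂ : List (Int × Int)} (h : l₁.Perm l₂) (n : Int) :
    coveredb l₁ n = coveredb l₂ n := by
  unfold coveredb
  exact h.any_eq

lemma mergedOf_eq (s : List (Int × Int) × Option (Int × Int)) :
    (match s.2 with | none => s.1 | some cur => s.1 ++ [cur]) = mergedOf s := rfl

-- ===== VERDICT (by name: the statement is the Claim_ definition above) =====
theorem calculate_invalid_values_spec : Claim_equal_calculate_invalid_values := by
  unfold Claim_equal_calculate_invalid_values
  intro fields ticket _
  unfold Spec_calculate_invalid_values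
  rw [portA_eq_filter]
  simp only [calculate_invalid_values_alt]
  rw [mergedOf_eq, PySem.List.foldl_append_if_eq_filter, List.nil_append]
  apply List.filter_congr
  intro n _
  have hsorted := PySem.List.sorted_pairwise (fields.flatMap (fun f => [f.2.1, f.2.2])) (fun r => r.1)
  obtain ⟨hR, hcov⟩ := covered_mergedAll _ hsorted
  rw [bisect_test _ hR n, hcov n,
      coveredb_perm (PySem.List.sorted_perm (fields.flatMap (fun f => [f.2.1, f.2.2])) (fun r => r.1) false) n,
      anyFields_eq_coveredb]
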